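-- pv_equiv track=rewrite | github.com/GorbunovGHub/Homework_32 | Homework_32.py | all_variants
-- ===== SOURCE A (Python) =====
-- import itertools
--
-- def all_variants(string):
--     temp_list = []
--     for i in range(1, len(string) + 1):
--         temp_list.append(list(itertools.combinations(string, i)))
--     for j in temp_list:
--         for k in j:
--             if ''.join(k) != 'ac':
--                 yield ''.join(k)
-- ===== SOURCE B (Python) =====
-- def comb(chars, k):
--     # all k-element combinations of chars, indices strictly increasing,
--     # in itertools' index-lexicographic order, by structural recursion
--     if k == 0:
--         yield []
--         return
--     if len(chars) < k:
--         return
--     first = chars[0]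
--     rest = chars[1:]
--     for tail in comb(rest, k - 1):
--         yield [first] + tail
--     yield from comb(rest, k)
--
-- def all_variants(string):
--     chars = list(string)
--     for k in range(1, len(chars) + 1):
--         for c in comb(chars, k):
--             s = ''.join(c)
--             if s != 'ac':
--                 yield s
-- ===== Notes on version B (the rewrite author's own statement) =====
-- stated objective: alternative
-- what changed: Replaces itertools.combinations and the temp_list buffering with a hand-written recursive generator comb(chars,k) (split off the head, combine head+tails of comb(rest,k-1), then comb(rest,k)), streaming each length's results directly instead of materialising lists of all combinations first.
import Mathlib
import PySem

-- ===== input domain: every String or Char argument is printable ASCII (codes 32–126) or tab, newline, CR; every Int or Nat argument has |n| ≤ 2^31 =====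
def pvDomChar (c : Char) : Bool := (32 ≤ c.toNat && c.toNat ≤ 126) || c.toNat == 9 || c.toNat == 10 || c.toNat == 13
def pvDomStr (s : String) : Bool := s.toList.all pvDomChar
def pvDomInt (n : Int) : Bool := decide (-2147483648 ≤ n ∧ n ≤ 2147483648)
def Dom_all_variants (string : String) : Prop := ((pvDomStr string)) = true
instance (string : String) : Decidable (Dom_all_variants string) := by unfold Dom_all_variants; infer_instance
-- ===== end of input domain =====

-- B replaces itertools.combinations and the temp_list buffering by a hand-written
-- structural-recursive combinations generator; same values, alternative decomposition.


-- ===== PORT A =====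
def all_variants (string : String) : List String :=
  let chars := string.toList
  let temp_list : List (List (List Char)) :=
    (PySem.List.pyRange 1 (chars.length + 1) 1).foldl
      (fun acc i => acc ++ [PySem.List.combinations chars i.toNat]) []
  temp_list.foldl
    (fun out j =>
      j.foldl (fun out k => if String.mk k ≠ "ac" then out ++ [String.mk k] else out) out) []

-- ===== PORT B =====
-- Source B's recursive comb(chars, k): the 'len(chars) < k' early return is the if-guard.
def combAlt : List Char → Nat → List (List Char)
  | _, 0 => [[]]
  | chars, k + 1 =>
    if chars.length < k + 1 then []
    else
      match chars with
      | [] => []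
      | x :: xs => ((combAlt xs k).map (fun t => x :: t)) ++ combAlt xs (k + 1)

def all_variants_alt (string : String) : List String :=
  let chars := string.toList
  (PySem.List.pyRange 1 (chars.length + 1) 1).foldl
    (fun out i =>
      (combAlt chars i.toNat).foldl
        (fun out c => if String.mk c ≠ "ac" then out ++ [String.mk c] else out) out) []

-- ===== PRECONDITION & SPEC =====
def Spec_all_variants (string : String) (out : List String) : Prop := out = all_variants_alt string
instance (string : String) (out : List String) : Decidable (Spec_all_variants string out) := by unfold Spec_all_variants; infer_instance

-- ===== CLAIM (what is proved, stated in full; the proofs are below) =====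
def Claim_equal_all_variants : Prop := ∀ (string : String), Dom_all_variants string → Spec_all_variants string (all_variants string)

-- ===== LEMMAS AND PROOFS =====

theorem combAlt_eq (xs : List Char) : ∀ k, combAlt xs k = PySem.List.combinations xs k := by
  induction xs with
  | nil =>
    intro k; cases k with
    | zero => simp [combAlt, PySem.List.combinations_zero]
    | succ k => simp [combAlt, PySem.List.combinations_nil_succ]
  | cons x xs ih =>
    intro k; cases k with
    | zero => simp [combAlt, PySem.List.combinations_zero]
    | succ k =>
      rw [combAlt, PySem.List.combinations_cons_succ]
      by_cases h : (x :: xs).length < k + 1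
      · have h1 : xs.length < k := by simpa using h
        rw [if_pos h, PySem.List.combinations_eq_nil_of_length_lt xs h1,
            PySem.List.combinations_eq_nil_of_length_lt xs (Nat.lt_succ_of_lt h1)]
        simp
      · rw [if_neg h, ih, ih]

theorem foldl_append_singleton {α β : Type} (g : α → β) :
    ∀ (l : List α) (init : List β),
      l.foldl (fun acc i => acc ++ [g i]) init = init ++ l.map g := by
  intro l
  induction l with
  | nil => simp
  | cons x xs ih => intro init; simp [List.foldl_cons, ih, List.append_assoc]

-- ===== VERDICT (by name: the statement is the Claim_ definition above) =====
theorem all_variants_spec : Claim_equal_all_variants := by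
  intro string _
  simp only [Spec_all_variants, all_variants, all_variants_alt,
    foldl_append_singleton, List.nil_append, List.foldl_map, combAlt_eq]
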